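-- pv_equiv track=rewrite | github.com/lamdapranshu/IBM_Build_A_thon_WindPredict | app.py | mean_direction
-- ===== SOURCE A (Python) =====
-- def mean_direction(x):
--     list = []
--     i = 15
--     while i <= 375:
--         list.append(i)
--         i += 30
--
--     for i in list:
--         if x < i:
--             x = i - 15
--             if x == 360:
--                 return 0
--             else:
--                 return x
-- ===== SOURCE B (Python) =====
-- def mean_direction(x):
--     if not (x < 375):
--         return None
--     if x < 15:
--         return 0
--     r = int((x + 15) // 30) * 30
--     return 0 if r == 360 else r
-- ===== Notes on version B (the rewrite author's own statement) =====
-- stated objective: simpler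
-- what changed: Replaced building the bin-edge list and scanning it linearly with closed-form arithmetic rounding to the nearest bin boundary (with the full-circle wrap and the out-of-range None guard).
import Mathlib
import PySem

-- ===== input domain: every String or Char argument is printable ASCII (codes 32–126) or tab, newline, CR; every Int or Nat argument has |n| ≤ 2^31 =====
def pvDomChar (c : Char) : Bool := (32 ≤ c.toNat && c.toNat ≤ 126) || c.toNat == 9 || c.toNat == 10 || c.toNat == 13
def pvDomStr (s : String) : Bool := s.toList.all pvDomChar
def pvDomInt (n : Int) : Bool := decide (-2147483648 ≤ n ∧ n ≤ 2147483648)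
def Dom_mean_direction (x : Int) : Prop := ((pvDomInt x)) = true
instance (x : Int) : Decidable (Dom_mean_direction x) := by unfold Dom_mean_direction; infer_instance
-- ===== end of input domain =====

-- B replaces A's bin-edge list build + linear scan with closed-form arithmetic rounding to the nearest multiple of 30 (simpler).


-- ===== PORT A =====
-- while loop building [15, 45, …, 375] (i starts at 15, += 30 while i ≤ 375)
def pvBuildA (i : Int) (fuel : Nat) (acc : List Int) : List Int :=
  match fuel with
  | 0 => acc.reverse
  | fuel + 1 => if i ≤ 375 then pvBuildA (i + 30) fuel (i :: acc) else acc.reverse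

-- the for loop: first i with x < i yields i - 15, wrapping 360 to 0; falls off → None
def pvScanA (x : Int) : List Int → Option Int
  | [] => none
  | i :: t =>
      if x < i then
        let x' := i - 15
        if x' = 360 then some 0 else some x'
      else pvScanA x t

def mean_direction (x : Int) : Option Int :=
  pvScanA x (pvBuildA 15 20 [])

-- ===== PORT B =====
def mean_direction_alt (x : Int) : Option Int :=
  if ¬ (x < 375) then none
  else if x < 15 then some 0
  else
    let r := PySem.Int.floordiv (x + 15) 30 * 30
    if r = 360 then some 0 else some r

-- ===== PRECONDITION & SPEC =====
def Spec_mean_direction (x : Int) (out : Option Int) : Prop := out = mean_direction_alt x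
instance (x : Int) (out : Option Int) : Decidable (Spec_mean_direction x out) := by unfold Spec_mean_direction; infer_instance

-- ===== CLAIM (what is proved, stated in full; the proofs are below) =====
def Claim_equal_mean_direction : Prop := ∀ (x : Int), Dom_mean_direction x → Spec_mean_direction x (mean_direction x)

-- ===== LEMMAS AND PROOFS =====

theorem pvBuild_eval : pvBuildA 15 20 [] = [15,45,75,105,135,165,195,225,255,285,315,345,375] := by
  decide

theorem floordiv_eq (a : Int) : PySem.Int.floordiv a 30 = a / 30 := by
  simp [PySem.Int.floordiv, Int.fdiv_eq_ediv]

-- ===== VERDICT (by name: the statement is the Claim_ definition above) =====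
set_option maxHeartbeats 1000000 in
theorem mean_direction_spec : Claim_equal_mean_direction := by
  intro x _
  unfold Spec_mean_direction
  simp only [mean_direction, pvBuild_eval, pvScanA, mean_direction_alt, floordiv_eq]
  rcases (by omega : x < 15 ∨ (15 + 30*0 ≤ x ∧ x < 15 + 30*1) ∨ (15 + 30*1 ≤ x ∧ x < 15 + 30*2) ∨ (15 + 30*2 ≤ x ∧ x < 15 + 30*3) ∨ (15 + 30*3 ≤ x ∧ x < 15 + 30*4) ∨ (15 + 30*4 ≤ x ∧ x < 15 + 30*5) ∨ (15 + 30*5 ≤ x ∧ x < 15 + 30*6) ∨ (15 + 30*6 ≤ x ∧ x < 15 + 30*7) ∨ (15 + 30*7 ≤ x ∧ x < 15 + 30*8) ∨ (15 + 30*8 ≤ x ∧ x < 15 + 30*9) ∨ (15 + 30*9 ≤ x ∧ x < 15 + 30*10) ∨ (15 + 30*10 ≤ x ∧ x < 15 + 30*11) ∨ (15 + 30*11 ≤ x ∧ x < 15 + 30*12) ∨ 375 ≤ x) with h|⟨hl1,hr1⟩|⟨hl2,hr2⟩|⟨hl3,hr3⟩|⟨hl4,hr4⟩|⟨hl5,h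r5⟩|⟨hl6,hr6⟩|⟨hl7,hr7⟩|⟨hl8,hr8⟩|⟨hl9,hr9⟩|⟨hl10,hr10⟩|⟨hl11,hr11⟩|⟨hl12,hr12⟩|h
  · rw [if_pos h, if_neg (show ¬((15:Int) - 15 = 360) from by omega), if_neg (show ¬¬x < 375 from by omega), if_pos h]
    norm_num
  · rw [if_neg (show ¬x < 15 from by omega), if_pos (show x < 45 from by omega), if_neg (show ¬((45:Int) - 15 = 360) from by omega),
        if_neg (show ¬¬x < 375 from by omega), if_neg (show ¬x < 15 from by omega)]
    rw [if_neg (show ¬((x + 15) / 30 * 30 = 360) from by omega)]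
    simp only [Option.some.injEq]; omega
  · rw [if_neg (show ¬x < 15 from by omega), if_neg (show ¬x < 45 from by omega), if_pos (show x < 75 from by omega), if_neg (show ¬((75:Int) - 15 = 360) from by omega),
        if_neg (show ¬¬x < 375 from by omega), if_neg (show ¬x < 15 from by omega)]
    rw [if_neg (show ¬((x + 15) / 30 * 30 = 360) from by omega)]
    simp only [Option.some.injEq]; omega
  · rw [if_neg (show ¬x < 15 from by omega), if_neg (show ¬x < 45 from by omega), if_neg (show ¬x < 75 from by omega), if_pos (show x < 105 from by omega), if_neg (show ¬((105:Int) - 15 = 360) from by omega),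
        if_neg (show ¬¬x < 375 from by omega), if_neg (show ¬x < 15 from by omega)]
    rw [if_neg (show ¬((x + 15) / 30 * 30 = 360) from by omega)]
    simp only [Option.some.injEq]; omega
  · rw [if_neg (show ¬x < 15 from by omega), if_neg (show ¬x < 45 from by omega), if_neg (show ¬x < 75 from by omega), if_neg (show ¬x < 105 from by omega), if_pos (show x < 135 from by omega), if_neg (show ¬((135:Int) - 15 = 360) from by omega),
        if_neg (show ¬¬x < 375 from by omega), if_neg (show ¬x < 15 from by omega)]
    rw [if_neg (show ¬((x + 15) / 30 * 30 = 360) from by omega)]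
    simp only [Option.some.injEq]; omega
  · rw [if_neg (show ¬x < 15 from by omega), if_neg (show ¬x < 45 from by omega), if_neg (show ¬x < 75 from by omega), if_neg (show ¬x < 105 from by omega), if_neg (show ¬x < 135 from by omega), if_pos (show x < 165 from by omega), if_neg (show ¬((165:Int) - 15 = 360) from by omega),
        if_neg (show ¬¬x < 375 from by omega), if_neg (show ¬x < 15 from by omega)]
    rw [if_neg (show ¬((x + 15) / 30 * 30 = 360) from by omega)]
    simp only [Option.some.injEq]; omega
  · rw [if_neg (show ¬x < 15 from by omega), if_neg (show ¬x < 45 from by omega), if_neg (show ¬x < 75 from by omega), if_neg (show ¬x < 105 from by omega), if_neg (show ¬x < 135 from by omega), if_neg (show ¬x < 165 from by omega), if_pos (show x < 195 from by omega), if_neg (show ¬((195:Int) - 15 = 360) from by omega),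
        if_neg (show ¬¬x < 375 from by omega), if_neg (show ¬x < 15 from by omega)]
    rw [if_neg (show ¬((x + 15) / 30 * 30 = 360) from by omega)]
    simp only [Option.some.injEq]; omega
  · rw [if_neg (show ¬x < 15 from by omega), if_neg (show ¬x < 45 from by omega), if_neg (show ¬x < 75 from by omega), if_neg (show ¬x < 105 from by omega), if_neg (show ¬x < 135 from by omega), if_neg (show ¬x < 165 from by omega), if_neg (show ¬x < 195 from by omega), if_pos (show x < 225 from by omega), if_neg (show ¬((225:Int) - 15 = 360) from by omega),
        if_neg (show ¬¬x < 375 from by omega), if_neg (show ¬x < 15 from by omega)]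
    rw [if_neg (show ¬((x + 15) / 30 * 30 = 360) from by omega)]
    simp only [Option.some.injEq]; omega
  · rw [if_neg (show ¬x < 15 from by omega), if_neg (show ¬x < 45 from by omega), if_neg (show ¬x < 75 from by omega), if_neg (show ¬x < 105 from by omega), if_neg (show ¬x < 135 from by omega), if_neg (show ¬x < 165 from by omega), if_neg (show ¬x < 195 from by omega), if_neg (show ¬x < 225 from by omega), if_pos (show x < 255 from by omega), if_neg (show ¬((255:Int) - 15 = 360) from by omega),
        if_neg (show ¬¬x < 375 from by omega), if_neg (show ¬x < 15 from by omega)]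
    rw [if_neg (show ¬((x + 15) / 30 * 30 = 360) from by omega)]
    simp only [Option.some.injEq]; omega
  · rw [if_neg (show ¬x < 15 from by omega), if_neg (show ¬x < 45 from by omega), if_neg (show ¬x < 75 from by omega), if_neg (show ¬x < 105 from by omega), if_neg (show ¬x < 135 from by omega), if_neg (show ¬x < 165 from by omega), if_neg (show ¬x < 195 from by omega), if_neg (show ¬x < 225 from by omega), if_neg (show ¬x < 255 from by omega), if_pos (show x < 285 from by omega), if_neg (show ¬((285:Int) - 15 = 360) from by omega),
        if_neg (show ¬¬x < 375 from by omega), if_neg (show ¬x < 15 from by omega)]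
    rw [if_neg (show ¬((x + 15) / 30 * 30 = 360) from by omega)]
    simp only [Option.some.injEq]; omega
  · rw [if_neg (show ¬x < 15 from by omega), if_neg (show ¬x < 45 from by omega), if_neg (show ¬x < 75 from by omega), if_neg (show ¬x < 105 from by omega), if_neg (show ¬x < 135 from by omega), if_neg (show ¬x < 165 from by omega), if_neg (show ¬x < 195 from by omega), if_neg (show ¬x < 225 from by omega), if_neg (show ¬x < 255 from by omega), if_neg (show ¬x < 285 from by omega), if_pos (show x < 315 from by omega), if_neg (show ¬((315:Int) - 15 = 360) from by omega),
        if_neg (show ¬¬x < 375 from by omega), if_neg (show ¬x < 15 from by omega)]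
    rw [if_neg (show ¬((x + 15) / 30 * 30 = 360) from by omega)]
    simp only [Option.some.injEq]; omega
  · rw [if_neg (show ¬x < 15 from by omega), if_neg (show ¬x < 45 from by omega), if_neg (show ¬x < 75 from by omega), if_neg (show ¬x < 105 from by omega), if_neg (show ¬x < 135 from by omega), if_neg (show ¬x < 165 from by omega), if_neg (show ¬x < 195 from by omega), if_neg (show ¬x < 225 from by omega), if_neg (show ¬x < 255 from by omega), if_neg (show ¬x < 285 from by omega), if_neg (show ¬x < 315 from by omega), if_pos (show x < 345 from by omega), if_neg (show ¬((345:Int) - 15 = 360) from by omega),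
        if_neg (show ¬¬x < 375 from by omega), if_neg (show ¬x < 15 from by omega)]
    rw [if_neg (show ¬((x + 15) / 30 * 30 = 360) from by omega)]
    simp only [Option.some.injEq]; omega
  · rw [if_neg (show ¬x < 15 from by omega), if_neg (show ¬x < 45 from by omega), if_neg (show ¬x < 75 from by omega), if_neg (show ¬x < 105 from by omega), if_neg (show ¬x < 135 from by omega), if_neg (show ¬x < 165 from by omega), if_neg (show ¬x < 195 from by omega), if_neg (show ¬x < 225 from by omega), if_neg (show ¬x < 255 from by omega), if_neg (show ¬x < 285 from by omega), if_neg (show ¬x < 315 from by omega), if_neg (show ¬x < 345 from by omega), if_pos (show x < 375 from by omega), if_pos (show ((375:Int) - 15 = 360) from by omega),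
        if_neg (show ¬¬x < 375 from by omega), if_neg (show ¬x < 15 from by omega)]
    rw [if_pos (show (x + 15) / 30 * 30 = 360 from by omega)]
  · rw [if_neg (show ¬x < 15 from by omega), if_neg (show ¬x < 45 from by omega), if_neg (show ¬x < 75 from by omega), if_neg (show ¬x < 105 from by omega), if_neg (show ¬x < 135 from by omega), if_neg (show ¬x < 165 from by omega), if_neg (show ¬x < 195 from by omega), if_neg (show ¬x < 225 from by omega), if_neg (show ¬x < 255 from by omega), if_neg (show ¬x < 285 from by omega), if_neg (show ¬x < 315 from by omega), if_neg (show ¬x < 345 from by omega), if_neg (show ¬x < 375 from by omega), if_pos (show ¬x < 375 from by omega)]
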